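-- pv_equiv track=rewrite | github.com/njohner/ost_pymodules | helix_rigid_body_motions.py | GetPossibleSeparationList
-- ===== SOURCE A (Python) =====
-- def GetPossibleSeparationList(n_ele,n_sep):
--   """
--   Returns all the possible separations of a list
--   with n_ele elements into n_sep+1 pieces
--   """
--   if n_sep<1:return []
--   indices_list=[[i] for i in range(1,n_ele+1-n_sep)]
--   for j in range(1,n_sep):
--     indices_new=[]
--     for el in indices_list:
--       for i in range(j,n_ele+1+j-n_sep):
--         if i<=el[-1]:continue
--         indices_new.append([k for k in el])
--         indices_new[-1].append(i)
--     indices_list=[el for el in indices_new]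
--   return indices_list
-- ===== SOURCE B (Python) =====
-- def GetPossibleSeparationList(n_ele, n_sep):
--     """
--     Returns all the possible separations of a list
--     with n_ele elements into n_sep+1 pieces
--     """
--     if n_sep < 1:
--         return []
--     def pick(start, remaining):
--         if remaining == 0:
--             return [[]]
--         res = []
--         for v in range(start, n_ele - remaining + 1):
--             res.extend([v] + tail for tail in pick(v + 1, remaining - 1))
--         return res
--     return pick(1, n_sep)
-- ===== Notes on version B (the rewrite author's own statement) =====
-- stated objective: simpler
-- what changed: Replaces the layer-by-layer iterative rebuilding of the whole candidate list (with an inner 'skip if not larger than last element' filter) by a direct recursive 'choose the next split point, recurse on the rest' enumeration pick(start, remaining), producing the same lexicographically ordered lists.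
import Mathlib
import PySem

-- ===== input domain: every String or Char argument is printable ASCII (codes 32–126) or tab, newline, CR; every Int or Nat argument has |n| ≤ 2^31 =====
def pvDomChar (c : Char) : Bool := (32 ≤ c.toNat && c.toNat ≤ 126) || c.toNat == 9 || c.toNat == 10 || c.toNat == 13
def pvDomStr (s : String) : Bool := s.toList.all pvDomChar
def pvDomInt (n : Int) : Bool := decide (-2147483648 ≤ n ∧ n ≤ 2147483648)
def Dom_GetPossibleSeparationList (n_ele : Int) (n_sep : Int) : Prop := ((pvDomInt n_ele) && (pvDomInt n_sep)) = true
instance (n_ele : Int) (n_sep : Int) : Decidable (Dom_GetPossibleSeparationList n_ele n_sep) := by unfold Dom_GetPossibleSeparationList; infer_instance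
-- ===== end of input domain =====

-- B replaces A's layer-by-layer iterative rebuilding of the candidate list by a direct
-- recursive "choose the next split point, recurse" enumeration (objective: simpler).

-- ===== PORT A =====
-- el[-1] is ported as pyGetD el (-1) 0; in A the lists el are always nonempty, so the
-- default 0 is never consulted on any reachable state.
def GetPossibleSeparationList (n_ele : Int) (n_sep : Int) : List (List Int) :=
  if n_sep < 1 then []
  else
    let indices_list := (PySem.List.pyRange 1 (n_ele + 1 - n_sep) 1).map (fun i => [i])
    (PySem.List.pyRange 1 n_sep 1).foldl
      (fun indices_list j =>
        indices_list.foldl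
          (fun indices_new el =>
            (PySem.List.pyRange j (n_ele + 1 + j - n_sep) 1).foldl
              (fun indices_new i =>
                if i ≤ PySem.List.pyGetD el (-1) 0 then indices_new
                else indices_new ++ [el ++ [i]])
              indices_new)
          [])
      indices_list

-- ===== PORT B =====
-- pick(start, remaining): remaining is a nonnegative Python int counting down to 0,
-- ported as a Nat so the structural recursion is the Python recursion.
def pickB (n_ele : Int) (start : Int) : Nat → List (List Int)
  | 0 => [[]]
  | r + 1 =>
    (PySem.List.pyRange start (n_ele - ((r : Int) + 1) + 1) 1).foldl
      (fun res v => res ++ (pickB n_ele (v + 1) r).map (fun tail => v :: tail)) []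

def GetPossibleSeparationList_alt (n_ele : Int) (n_sep : Int) : List (List Int) :=
  if n_sep < 1 then [] else pickB n_ele 1 n_sep.toNat

-- ===== PRECONDITION & SPEC =====
def Spec_GetPossibleSeparationList (n_ele : Int) (n_sep : Int) (out : List (List Int)) : Prop := out = GetPossibleSeparationList_alt n_ele n_sep
instance (n_ele : Int) (n_sep : Int) (out : List (List Int)) : Decidable (Spec_GetPossibleSeparationList n_ele n_sep out) := by unfold Spec_GetPossibleSeparationList; infer_instance

-- ===== CLAIM (what is proved, stated in full; the proofs are below) =====
def Claim_equal_GetPossibleSeparationList : Prop := ∀ (n_ele : Int) (n_sep : Int), Dom_GetPossibleSeparationList n_ele n_sep → Spec_GetPossibleSeparationList n_ele n_sep (GetPossibleSeparationList n_ele n_sep)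

-- ===== LEMMAS AND PROOFS =====

-- A's one layer, as a named function (definitionally the fold body of the port of A).
def stepFun (n_ele n_sep : Int) : List (List Int) → Int → List (List Int) :=
  fun indices_list j =>
    indices_list.foldl
      (fun indices_new el =>
        (PySem.List.pyRange j (n_ele + 1 + j - n_sep) 1).foldl
          (fun indices_new i =>
            if i ≤ PySem.List.pyGetD el (-1) 0 then indices_new
            else indices_new ++ [el ++ [i]])
          indices_new)
      []

lemma foldl_skip_if {α β : Type} (p : α → Prop) [DecidablePred p] (f : α → β)
    (l : List α) (acc : List β) :
    l.foldl (fun acc x => if p x then acc else acc ++ [f x]) acc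
      = acc ++ (l.filter (fun x => decide ¬ p x)).map f := by
  induction l generalizing acc with
  | nil => simp
  | cons x xs ih =>
    by_cases h : p x <;> simp [List.foldl_cons, ih, h]

lemma flatMap_congr_mem {α β : Type} (l : List α) (f g : α → List β)
    (h : ∀ x ∈ l, f x = g x) : l.flatMap f = l.flatMap g := by
  induction l with
  | nil => rfl
  | cons x xs ih =>
    simp only [List.flatMap_cons, h x (List.mem_cons_self), ih fun y hy => h y (List.mem_cons_of_mem _ hy)]

lemma filter_gt_pyRange (a b ℓ : Int) (h : a ≤ ℓ + 1) :
    (PySem.List.pyRange a b 1).filter (fun i => decide ¬ i ≤ ℓ)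
      = PySem.List.pyRange (ℓ + 1) b 1 := by
  by_cases hb : ℓ + 1 ≤ b
  · rw [PySem.List.pyRange_one_append a (ℓ + 1) b h hb, List.filter_append]
    have h1 : (PySem.List.pyRange a (ℓ + 1) 1).filter (fun i => decide ¬ i ≤ ℓ) = [] := by
      rw [List.filter_eq_nil_iff]
      intro x hx
      have := (PySem.List.mem_pyRange_one).1 hx
      simp only [decide_not, Bool.not_eq_true', decide_eq_false_iff_not, not_not]
      omega
    have h2 : (PySem.List.pyRange (ℓ + 1) b 1).filter (fun i => decide ¬ i ≤ ℓ)
        = PySem.List.pyRange (ℓ + 1) b 1 := by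
      rw [List.filter_eq_self]
      intro x hx
      have := (PySem.List.mem_pyRange_one).1 hx
      simp only [decide_not, Bool.not_eq_true', decide_eq_false_iff_not]
      omega
    rw [h1, h2, List.nil_append]
  · rw [PySem.List.pyRange_one_eq_nil (a := ℓ + 1) (by omega), List.filter_eq_nil_iff]
    intro x hx
    have := (PySem.List.mem_pyRange_one).1 hx
    simp only [decide_not, Bool.not_eq_true', decide_eq_false_iff_not, not_not]
    omega

-- One layer of A, in closed form: extend every el by each admissible next index.
lemma stepFun_eq (n_ele n_sep j : Int) (L : List (List Int)) :
    stepFun n_ele n_sep L j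
      = L.flatMap (fun el =>
          ((PySem.List.pyRange j (n_ele + 1 + j - n_sep) 1).filter
              (fun i => decide ¬ i ≤ PySem.List.pyGetD el (-1) 0)).map (fun i => el ++ [i])) := by
  unfold stepFun
  have : ∀ (el : List Int) (acc : List (List Int)),
      (PySem.List.pyRange j (n_ele + 1 + j - n_sep) 1).foldl
        (fun indices_new i =>
          if i ≤ PySem.List.pyGetD el (-1) 0 then indices_new
          else indices_new ++ [el ++ [i]]) acc
      = acc ++ ((PySem.List.pyRange j (n_ele + 1 + j - n_sep) 1).filter
          (fun i => decide ¬ i ≤ PySem.List.pyGetD el (-1) 0)).map (fun i => el ++ [i]) := by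
    intro el acc
    exact foldl_skip_if (fun i => i ≤ PySem.List.pyGetD el (-1) 0) (fun i => el ++ [i]) _ acc
  calc L.foldl (fun indices_new el =>
          (PySem.List.pyRange j (n_ele + 1 + j - n_sep) 1).foldl
            (fun indices_new i =>
              if i ≤ PySem.List.pyGetD el (-1) 0 then indices_new
              else indices_new ++ [el ++ [i]]) indices_new) []
      = L.foldl (fun acc el => acc ++ ((PySem.List.pyRange j (n_ele + 1 + j - n_sep) 1).filter
          (fun i => decide ¬ i ≤ PySem.List.pyGetD el (-1) 0)).map (fun i => el ++ [i])) [] := by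
        apply PySem.List.foldl_congr_mem
        intro acc el _
        exact this el acc
    _ = _ := by
        rw [PySem.List.foldl_append_eq_flatMap, List.nil_append]

-- pickB at a positive count, in closed form.
lemma pickB_succ (n_ele start : Int) (r : Nat) :
    pickB n_ele start (r + 1)
      = (PySem.List.pyRange start (n_ele - (r : Int)) 1).flatMap
          (fun v => (pickB n_ele (v + 1) r).map (fun tail => v :: tail)) := by
  show (PySem.List.pyRange start (n_ele - ((r : Int) + 1) + 1) 1).foldl
      (fun res v => res ++ (pickB n_ele (v + 1) r).map (fun tail => v :: tail)) [] = _
  rw [PySem.List.foldl_append_eq_flatMap, List.nil_append]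
  have : n_ele - ((r : Int) + 1) + 1 = n_ele - (r : Int) := by omega
  rw [this]

-- Main invariant: running A's remaining layers j, j+1, …, n_sep-1 on a state whose
-- elements all end in a value ≥ j yields, for each element, its pickB-continuation.
lemma layers_eq (n_ele n_sep : Int) :
    ∀ (r : Nat) (j : Int), j = n_sep - (r : Int) → 1 ≤ j →
    ∀ (L : List (List Int)), (∀ el ∈ L, ∃ p ℓ, el = p ++ [ℓ] ∧ j ≤ ℓ) →
    (PySem.List.pyRange j n_sep 1).foldl (stepFun n_ele n_sep) L
      = L.flatMap (fun el =>
          (pickB n_ele (PySem.List.pyGetD el (-1) 0 + 1) r).map (fun t => el ++ t)) := by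
  intro r
  induction r with
  | zero =>
    intro j hj _ L _
    rw [hj]
    simp only [Int.natCast_zero, Int.sub_zero]
    rw [PySem.List.pyRange_one_eq_nil le_rfl]
    simp [pickB]
  | succ r ih =>
    intro j hj hj1 L hL
    have hjlt : j < n_sep := by omega
    rw [PySem.List.pyRange_one_cons hjlt, List.foldl_cons, stepFun_eq]
    have hE : n_ele + 1 + j - n_sep = n_ele - (r : Int) := by omega
    -- the state after this layer
    set L' := L.flatMap (fun el =>
        ((PySem.List.pyRange j (n_ele + 1 + j - n_sep) 1).filter
            (fun i => decide ¬ i ≤ PySem.List.pyGetD el (-1) 0)).map (fun i => el ++ [i])) with hL'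
    have hL'inv : ∀ el ∈ L', ∃ p ℓ, el = p ++ [ℓ] ∧ j + 1 ≤ ℓ := by
      intro el hel
      rw [hL', List.mem_flatMap] at hel
      obtain ⟨e, heL, hel⟩ := hel
      rw [List.mem_map] at hel
      obtain ⟨i, hi, rfl⟩ := hel
      obtain ⟨p, ℓ, rfl, hℓ⟩ := hL e heL
      rw [List.mem_filter] at hi
      have hmem := (PySem.List.mem_pyRange_one).1 hi.1
      have hgt : ¬ i ≤ PySem.List.pyGetD (p ++ [ℓ]) (-1) 0 := by
        simpa using hi.2
      rw [PySem.List.pyGetD_neg_one_append_singleton] at hgt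
      exact ⟨p ++ [ℓ], i, rfl, by omega⟩
    rw [ih (j + 1) (by omega) (by omega) L' hL'inv]
    rw [hL', List.flatMap_assoc]
    apply flatMap_congr_mem
    intro el helL
    obtain ⟨p, ℓ, rfl, hℓ⟩ := hL el helL
    rw [PySem.List.pyGetD_neg_one_append_singleton]
    rw [filter_gt_pyRange j _ ℓ (by omega), hE, pickB_succ]
    rw [List.flatMap_map, List.map_flatMap]
    apply flatMap_congr_mem
    intro v _
    rw [PySem.List.pyGetD_neg_one_append_singleton (p ++ [ℓ]) v]
    simp [List.map_map, Function.comp, List.append_assoc]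

-- ===== VERDICT (by name: the statement is the Claim_ definition above) =====
theorem GetPossibleSeparationList_spec : Claim_equal_GetPossibleSeparationList := by
  intro n_ele n_sep _
  unfold Spec_GetPossibleSeparationList GetPossibleSeparationList GetPossibleSeparationList_alt
  by_cases h : n_sep < 1
  · simp [h]
  · simp only [h, if_false]
    have h1 : 1 ≤ n_sep := by omega
    have hr : (1 : Int) = n_sep - ((n_sep - 1).toNat : Int) := by omega
    have hinit : ∀ el ∈ (PySem.List.pyRange 1 (n_ele + 1 - n_sep) 1).map (fun i => [i]),
        ∃ p ℓ, el = p ++ [ℓ] ∧ (1 : Int) ≤ ℓ := by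
      intro el hel
      rw [List.mem_map] at hel
      obtain ⟨i, hi, rfl⟩ := hel
      have := (PySem.List.mem_pyRange_one).1 hi
      exact ⟨[], i, rfl, this.1⟩
    show List.foldl (stepFun n_ele n_sep)
        ((PySem.List.pyRange 1 (n_ele + 1 - n_sep) 1).map (fun i => [i]))
        (PySem.List.pyRange 1 n_sep 1) = pickB n_ele 1 n_sep.toNat
    rw [layers_eq n_ele n_sep (n_sep - 1).toNat 1 hr le_rfl _ hinit]
    have hS : n_sep.toNat = (n_sep - 1).toNat + 1 := by omega
    rw [hS, pickB_succ, List.flatMap_map]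
    have hE2 : n_ele - ((n_sep - 1).toNat : Int) = n_ele + 1 - n_sep := by omega
    rw [hE2]
    apply flatMap_congr_mem
    intro i _
    have hlast : PySem.List.pyGetD [i] (-1) 0 = i :=
      PySem.List.pyGetD_neg_one_append_singleton [] i 0
    rw [hlast]
    simp
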